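-- pv_equiv track=rewrite | github.com/SuperElephantWS/game_ConnectFour | connect_four.py | winner_list
-- ===== SOURCE A (Python) =====
-- def winner_list(row_size, column_size):
--     '''is_winner() -> None
--     determine if there is a winner
--     '''
--     winnerList = []
--
--     #... horizontal
--     for row in range(row_size):
--         for column in range(column_size - 3):
--             winnerList.append([[row, column], [row, column + 1], [row, column + 2], [row, column + 3]])
--
--     #... vertical
--     for row in range(row_size - 3):
--         for column in range(column_size):
--             winnerList.append([[row, column], [row + 1, column], [row + 2, column], [row + 3, column]])
--
--     #... right diagonal
--     for row in range(3, row_size):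
--         for column in range(column_size - 3):
--             winnerList.append([[row, column], [row - 1, column + 1], [row - 2, column + 2], [row - 3, column + 3]])
--
--     #... left diagonal
--     for row in range(row_size - 3):
--         for column in range(column_size - 3):
--             winnerList.append([[row, column], [row + 1, column + 1], [row + 2, column + 2], [row + 3, column + 3]])
--
--     return winnerList
-- ===== SOURCE B (Python) =====
-- def winner_list(row_size, column_size):
--     winnerList = []
--     for dr, dc in [(0, 1), (1, 0), (-1, 1), (1, 1)]:
--         for row in range(row_size):
--             for column in range(column_size):
--                 cells = [[row + i * dr, column + i * dc] for i in range(4)]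
--                 if all(0 <= r < row_size and 0 <= c < column_size for r, c in cells):
--                     winnerList.append(cells)
--     return winnerList
-- ===== Notes on version B (the rewrite author's own statement) =====
-- stated objective: idiomatic
-- what changed: Replaces the four hand-written per-direction nested loops (each with its own precomputed anchor ranges and unrolled coordinate arithmetic) by one generic loop over a table of direction vectors that generates each candidate line as [row+i*dr, col+i*dc] for i in range(4) and keeps it only if all four cells lie on the board.
import Mathlib
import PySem

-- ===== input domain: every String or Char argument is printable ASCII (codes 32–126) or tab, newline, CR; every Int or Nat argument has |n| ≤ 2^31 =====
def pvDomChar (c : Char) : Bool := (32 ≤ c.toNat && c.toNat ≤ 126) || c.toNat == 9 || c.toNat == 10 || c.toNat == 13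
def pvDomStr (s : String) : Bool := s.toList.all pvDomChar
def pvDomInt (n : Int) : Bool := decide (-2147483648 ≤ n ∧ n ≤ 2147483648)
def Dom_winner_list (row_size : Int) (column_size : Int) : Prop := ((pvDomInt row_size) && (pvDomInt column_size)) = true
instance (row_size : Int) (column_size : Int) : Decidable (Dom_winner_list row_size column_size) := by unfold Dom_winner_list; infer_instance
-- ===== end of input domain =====

-- B replaces A's four hand-written per-direction nested loops by one generic loop over a
-- table of direction vectors with an on-board check (more idiomatic; same cost).

-- ===== PORT A =====
def winner_list (row_size : Int) (column_size : Int) : List (List (List Int)) :=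
  let winnerList : List (List (List Int)) := []
  -- horizontal
  let winnerList := (PySem.List.pyRange 0 row_size 1).foldl (fun acc row =>
    (PySem.List.pyRange 0 (column_size - 3) 1).foldl (fun acc column =>
      acc ++ [[[row, column], [row, column + 1], [row, column + 2], [row, column + 3]]]) acc) winnerList
  -- vertical
  let winnerList := (PySem.List.pyRange 0 (row_size - 3) 1).foldl (fun acc row =>
    (PySem.List.pyRange 0 column_size 1).foldl (fun acc column =>
      acc ++ [[[row, column], [row + 1, column], [row + 2, column], [row + 3, column]]]) acc) winnerList
  -- right diagonal
  let winnerList := (PySem.List.pyRange 3 row_size 1).foldl (fun acc row =>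
    (PySem.List.pyRange 0 (column_size - 3) 1).foldl (fun acc column =>
      acc ++ [[[row, column], [row - 1, column + 1], [row - 2, column + 2], [row - 3, column + 3]]]) acc) winnerList
  -- left diagonal
  let winnerList := (PySem.List.pyRange 0 (row_size - 3) 1).foldl (fun acc row =>
    (PySem.List.pyRange 0 (column_size - 3) 1).foldl (fun acc column =>
      acc ++ [[[row, column], [row + 1, column + 1], [row + 2, column + 2], [row + 3, column + 3]]]) acc) winnerList
  winnerList

-- ===== PORT B =====
def winner_list_alt (row_size : Int) (column_size : Int) : List (List (List Int)) :=
  [((0 : Int), (1 : Int)), (1, 0), (-1, 1), (1, 1)].foldl (fun acc d =>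
    (PySem.List.pyRange 0 row_size 1).foldl (fun acc row =>
      (PySem.List.pyRange 0 column_size 1).foldl (fun acc column =>
        let cells := (PySem.List.pyRange 0 4 1).map (fun i => [row + i * d.1, column + i * d.2])
        if cells.all (fun cell => match cell with
            | [r, c] => decide (0 ≤ r ∧ r < row_size ∧ 0 ≤ c ∧ c < column_size)
            | _ => false) then acc ++ [cells] else acc) acc) acc) []

-- ===== PRECONDITION & SPEC =====
def Spec_winner_list (row_size : Int) (column_size : Int) (out : List (List (List Int))) : Prop := out = winner_list_alt row_size column_size
instance (row_size : Int) (column_size : Int) (out : List (List (List Int))) : Decidable (Spec_winner_list row_size column_size out) := by unfold Spec_winner_list; infer_instance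

-- ===== CLAIM (what is proved, stated in full; the proofs are below) =====
def Claim_equal_winner_list : Prop := ∀ (row_size : Int) (column_size : Int), Dom_winner_list row_size column_size → Spec_winner_list row_size column_size (winner_list row_size column_size)

-- ===== LEMMAS AND PROOFS =====

-- filter of a contiguous int range by an upper bound is again a contiguous range
lemma pyRange_filter_lt (a b c : Int) :
    (PySem.List.pyRange a b 1).filter (fun x => decide (x < c)) =
      PySem.List.pyRange a (min b c) 1 := by
  generalize hn : (b - a).toNat = n
  induction n generalizing a with
  | zero =>
      rw [PySem.List.pyRange_one_eq_nil (by omega), PySem.List.pyRange_one_eq_nil (by omega)]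
      rfl
  | succ n ih =>
      rw [PySem.List.pyRange_one_cons (by omega), List.filter_cons]
      by_cases hc : a < c
      · simp only [hc, decide_true, if_true]
        rw [ih (a + 1) (by omega),
          show PySem.List.pyRange a (min b c) 1 = a :: PySem.List.pyRange (a + 1) (min b c) 1
            from PySem.List.pyRange_one_cons (by omega)]
      · simp only [hc, decide_false]
        rw [if_neg Bool.false_ne_true, ih (a + 1) (by omega),
          PySem.List.pyRange_one_eq_nil (by omega), PySem.List.pyRange_one_eq_nil (by omega)]

-- filter of a contiguous int range by a two-sided window is again a contiguous range
lemma pyRange_filter_band (a b lo hi : Int) :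
    (PySem.List.pyRange a b 1).filter (fun x => decide (lo ≤ x) && decide (x < hi)) =
      PySem.List.pyRange (max a lo) (min b hi) 1 := by
  generalize hn : (b - a).toNat = n
  induction n generalizing a with
  | zero =>
      rw [PySem.List.pyRange_one_eq_nil (by omega), PySem.List.pyRange_one_eq_nil (by omega)]
      rfl
  | succ n ih =>
      rw [PySem.List.pyRange_one_cons (by omega), List.filter_cons]
      by_cases hk : lo ≤ a ∧ a < hi
      · simp only [hk.1, hk.2, decide_true, Bool.and_self, if_true]
        have h1 : max (a + 1) lo = a + 1 := by omega
        have h2 : max a lo = a := by omega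
        rw [ih (a + 1) (by omega), h1, h2,
          show PySem.List.pyRange a (min b hi) 1 = a :: PySem.List.pyRange (a + 1) (min b hi) 1
            from PySem.List.pyRange_one_cons (by omega)]
      · have hfalse : (decide (lo ≤ a) && decide (a < hi)) = false := by
          rcases Decidable.not_and_iff_not_or_not.mp hk with h | h <;> simp [h]
        rw [hfalse, if_neg Bool.false_ne_true, ih (a + 1) (by omega)]
        rcases Decidable.not_and_iff_not_or_not.mp hk with h | h
        · have h1 : max (a + 1) lo = max a lo := by omega
          rw [h1]
        · rw [PySem.List.pyRange_one_eq_nil (by omega), PySem.List.pyRange_one_eq_nil (by omega)]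

-- a flatMap whose body is guarded by a boolean is a flatMap over the filtered list
lemma flatMap_ite {a : Type} {b : Type} (l : List a) (p : a → Bool) (f : a → List b) :
    (l.flatMap fun x => if p x then f x else []) = (l.filter p).flatMap f := by
  induction l with
  | nil => rfl
  | cons x xs ih => by_cases h : p x <;> simp [h, ih]

-- one direction of B's generic scan equals the corresponding restricted double loop of A
lemma direction_eq (rs cs a b c : Int) (g : Int → Int → List (List Int)) (P : Int → Int → Bool)
    (hP : ∀ x y, 0 ≤ x → x < rs → 0 ≤ y → y < cs →
      P x y = (decide (a ≤ x) && decide (x < b) && decide (y < c)))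
    (ha : 0 ≤ a) (hb : b ≤ rs) (hc : c ≤ cs) :
    ((PySem.List.pyRange 0 rs 1).flatMap fun x =>
        ((PySem.List.pyRange 0 cs 1).filter (P x)).map (g x)) =
      (PySem.List.pyRange a b 1).flatMap fun x => (PySem.List.pyRange 0 c 1).map (g x) := by
  have hrow : ∀ x ∈ PySem.List.pyRange 0 rs 1,
      ((PySem.List.pyRange 0 cs 1).filter (P x)).map (g x)
        = if (decide (a ≤ x) && decide (x < b)) then (PySem.List.pyRange 0 c 1).map (g x)
          else [] := by
    intro x hx
    rw [PySem.List.mem_pyRange_one] at hx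
    have hq : (PySem.List.pyRange 0 cs 1).filter (P x)
        = (PySem.List.pyRange 0 cs 1).filter
            (fun y => decide (a ≤ x) && decide (x < b) && decide (y < c)) :=
      List.filter_congr (fun y hy => hP x y hx.1 hx.2
        ((PySem.List.mem_pyRange_one).mp hy).1 ((PySem.List.mem_pyRange_one).mp hy).2)
    rw [hq]
    by_cases h : (decide (a ≤ x) && decide (x < b)) = true
    · rw [if_pos h]
      have hfun : (fun y => decide (a ≤ x) && decide (x < b) && decide (y < c))
          = fun y : Int => decide (y < c) := by
        funext y; rw [h, Bool.true_and]
      rw [hfun, pyRange_filter_lt]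
      have : min cs c = c := by omega
      rw [this]
    · rw [if_neg h]
      have hfun : (fun y => decide (a ≤ x) && decide (x < b) && decide (y < c))
          = fun _ : Int => false := by
        funext y; rw [Bool.eq_false_iff.mpr h, Bool.false_and]
      rw [hfun, List.filter_false, List.map_nil]
  rw [List.flatMap_congr hrow, flatMap_ite, pyRange_filter_band]
  have h1 : max 0 a = a := by omega
  have h2 : min rs b = b := by omega
  rw [h1, h2]

theorem winner_list_spec' (rs cs : Int) : winner_list rs cs = winner_list_alt rs cs := by
  unfold winner_list winner_list_alt
  simp only [List.foldl_cons, List.foldl_nil,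
    PySem.List.foldl_append_if, PySem.List.foldl_append_singleton_eq_map,
    PySem.List.foldl_append_eq_flatMap, List.nil_append, List.append_assoc]
  simp only [show PySem.List.pyRange 0 4 1 = [0, 1, 2, 3] from by decide,
    List.map_cons, List.map_nil, List.all_cons, List.all_nil, Bool.and_true]
  norm_num
  simp only [sub_eq_add_neg]
  congr 1
  · exact (direction_eq rs cs 0 rs (cs - 3) _ _
      (by intro x y hx0 hx1 hy0 hy1; rw [Bool.eq_iff_iff]; simp only [Bool.and_eq_true,
        decide_eq_true_eq]; omega) (by omega) (by omega) (by omega)).symm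
  congr 1
  · exact (direction_eq rs cs 0 (rs - 3) cs _ _
      (by intro x y hx0 hx1 hy0 hy1; rw [Bool.eq_iff_iff]; simp only [Bool.and_eq_true,
        decide_eq_true_eq]; omega) (by omega) (by omega) (by omega)).symm
  congr 1
  · exact (direction_eq rs cs 3 rs (cs - 3) _ _
      (by intro x y hx0 hx1 hy0 hy1; rw [Bool.eq_iff_iff]; simp only [Bool.and_eq_true,
        decide_eq_true_eq]; omega) (by omega) (by omega) (by omega)).symm
  · exact (direction_eq rs cs 0 (rs - 3) (cs - 3) _ _
      (by intro x y hx0 hx1 hy0 hy1; rw [Bool.eq_iff_iff]; simp only [Bool.and_eq_true,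
        decide_eq_true_eq]; omega) (by omega) (by omega) (by omega)).symm

-- ===== VERDICT (by name: the statement is the Claim_ definition above) =====
theorem winner_list_spec : Claim_equal_winner_list := by
  intro rs cs _
  unfold Spec_winner_list
  exact winner_list_spec' rs cs
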